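-- pv_equiv track=rewrite | github.com/zhuangchongyi/SearchDjangoProject | djangoProject/main/utils.py | get_combination_words
-- ===== SOURCE A (Python) =====
-- def get_combination_words(characters):
--     combinations = []
--
--     def backtrack(curr_combination, remaining_chars):
--         # 添加当前组合到结果列表
--         if curr_combination != '':
--             combinations.append(curr_combination)
--         for char in remaining_chars:
--             new_remaining = [c for c in remaining_chars if c != char]
--             # 递归调用 backtrack，加上当前字符作为新的组合
--             backtrack(curr_combination + char, new_remaining)
--
--     backtrack('', characters)
--     # for r in range(1, len(characters) + 1):
--     #     itertools_combinations = list(itertools.combinations(characters, r))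
--     #     combination_word = ""
--     #     for combination in itertools_combinations:
--     #         combination_word += "".join(combination)
--     #     combinations.append(combination_word)
--     return combinations
-- ===== SOURCE B (Python) =====
-- def get_combination_words(characters):
--     # Iterative DFS with an explicit stack of (current word, remaining chars)
--     # instead of A's recursive backtracking; same output in the same order.
--     results = []
--     stack = [('', list(characters))]
--     while stack:
--         curr, remaining = stack.pop()
--         if curr != '':
--             results.append(curr)
--         children = [(curr + ch, [c for c in remaining if c != ch]) for ch in remaining]
--         stack.extend(reversed(children))
--     return results
-- ===== Notes on version B (the rewrite author's own statement) =====
-- stated objective: alternative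
-- what changed: Replaces A's recursive backtracking with a closure-mutated list by an iterative DFS over an explicit stack of (current word, remaining chars) frames, pushing children in reverse so the pre-order output is identical.
import Mathlib
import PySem

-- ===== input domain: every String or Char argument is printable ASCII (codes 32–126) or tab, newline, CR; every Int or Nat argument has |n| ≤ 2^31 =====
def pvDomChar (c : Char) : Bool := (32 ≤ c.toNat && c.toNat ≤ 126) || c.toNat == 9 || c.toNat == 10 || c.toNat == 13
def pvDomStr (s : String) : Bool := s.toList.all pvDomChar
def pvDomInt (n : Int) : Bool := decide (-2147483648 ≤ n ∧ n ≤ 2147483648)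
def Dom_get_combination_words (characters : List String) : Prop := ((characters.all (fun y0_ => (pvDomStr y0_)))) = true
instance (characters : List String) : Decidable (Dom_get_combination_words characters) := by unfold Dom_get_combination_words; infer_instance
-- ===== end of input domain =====

-- B replaces A's recursive backtracking (closure appending to a shared list) by an
-- iterative DFS over an explicit stack of (current word, remaining chars) frames;
-- same return value in the same order.

-- ===== PORT A =====
-- recursive backtrack(curr_combination, remaining_chars); the mutated `combinations`
-- list is threaded as the accumulator `acc`
def pvBacktrackA (curr : String) (remaining : List String) (acc : List String) : List String :=
  let acc1 := if curr != "" then acc ++ [curr] else acc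
  remaining.attach.foldl
    (fun a x => pvBacktrackA (curr ++ x.1) (remaining.filter (fun c => c != x.1)) a) acc1
termination_by remaining.length
decreasing_by
  simp only [List.unattach, List.length_map]
  have h : (remaining.attach.filter (fun x1 => x1.1 != x.1)).length < remaining.attach.length :=
    List.length_filter_lt_length_iff_exists.mpr ⟨x, List.mem_attach _ _, by simp⟩
  simpa using h

def get_combination_words (characters : List String) : List String :=
  pvBacktrackA "" characters []

-- ===== PORT B =====
-- weight of one stack frame, used only for the termination measure of the while loop
def pvFrameWeight (p : String × List String) : Nat := (p.2.length + 1).factorial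

def pvStackMu (stack : List (String × List String)) : Nat := (stack.map pvFrameWeight).sum

-- popping a frame and pushing its children strictly decreases the measure
theorem pvStackMu_step (curr : String) (rem : List String) (rest : List (String × List String)) :
    pvStackMu ((rem.map (fun ch => (curr ++ ch, rem.filter (fun c => c != ch)))) ++ rest)
      < pvStackMu ((curr, rem) :: rest) := by
  simp only [pvStackMu, List.map_append, List.sum_append, List.map_cons, List.sum_cons]
  have h1 : ((rem.map (fun ch => (curr ++ ch, rem.filter (fun c => c != ch)))).map pvFrameWeight).sum
      ≤ ((rem.map (fun ch => (curr ++ ch, rem.filter (fun c => c != ch)))).map pvFrameWeight).length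
          • rem.length.factorial := by
    refine List.sum_le_card_nsmul _ _ ?_
    intro w hw
    simp only [List.map_map, List.mem_map, Function.comp] at hw
    obtain ⟨ch, hch, hw⟩ := hw
    subst hw
    have hlt : (rem.filter (fun c => c != ch)).length < rem.length := by
      refine List.length_filter_lt_length_iff_exists.mpr ⟨ch, hch, ?_⟩
      simp
    simp only [pvFrameWeight]
    exact Nat.factorial_le (by omega)
  have hpos := rem.length.factorial_pos
  have h2 : rem.length * rem.length.factorial < pvFrameWeight (curr, rem) := by
    simp only [pvFrameWeight, Nat.factorial_succ]
    exact Nat.mul_lt_mul_of_lt_of_le (by omega) (le_refl _) hpos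
  simp only [List.length_map, smul_eq_mul] at h1
  omega

-- the while loop; the head of the list is the top of the Python stack, so
-- `stack.extend(reversed(children))` becomes `children ++ rest`
def pvStackLoop (stack : List (String × List String)) (results : List String) : List String :=
  match stack with
  | [] => results
  | (curr, rem) :: rest =>
    let results1 := if curr != "" then results ++ [curr] else results
    pvStackLoop ((rem.map (fun ch => (curr ++ ch, rem.filter (fun c => c != ch)))) ++ rest) results1
termination_by pvStackMu stack
decreasing_by
  have h := pvStackMu_step curr rem rest
  simp only [List.unattach_filter, List.unattach_attach] at *
  rw [List.attach_map_val (l := rem) (f := fun ch => (curr ++ ch, rem.filter (fun c => c != ch)))]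
  exact h

def get_combination_words_alt (characters : List String) : List String :=
  pvStackLoop [("", characters)] []

-- ===== PRECONDITION & SPEC =====
def Spec_get_combination_words (characters : List String) (out : List String) : Prop := out = get_combination_words_alt characters
instance (characters : List String) (out : List String) : Decidable (Spec_get_combination_words characters out) := by unfold Spec_get_combination_words; infer_instance

-- ===== CLAIM (what is proved, stated in full; the proofs are below) =====
def Claim_equal_get_combination_words : Prop := ∀ (characters : List String), Dom_get_combination_words characters → Spec_get_combination_words characters (get_combination_words characters)

-- ===== LEMMAS AND PROOFS =====

-- running the loop on `frames ++ rest` first folds A's backtracking over `frames`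
theorem pvStackLoop_eq_foldl (n : Nat) :
    ∀ (frames : List (String × List String)), pvStackMu frames ≤ n →
      ∀ (rest : List (String × List String)) (res : List String),
        pvStackLoop (frames ++ rest) res
          = pvStackLoop rest (frames.foldl (fun a p => pvBacktrackA p.1 p.2 a) res) := by
  induction n with
  | zero =>
    intro frames hmu rest res
    match frames with
    | [] => simp
    | (curr, rem) :: fs =>
      exfalso
      have : 0 < pvFrameWeight (curr, rem) := (rem.length + 1).factorial_pos
      simp only [pvStackMu, List.map_cons, List.sum_cons] at hmu
      omega
  | succ n ih =>
    intro frames hmu rest res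
    match frames with
    | [] => simp
    | (curr, rem) :: fs =>
      have hstep := pvStackMu_step curr rem fs
      have hle : pvStackMu ((rem.map (fun ch => (curr ++ ch, rem.filter (fun c => c != ch)))) ++ fs) ≤ n := by
        omega
      calc pvStackLoop (((curr, rem) :: fs) ++ rest) res
          = pvStackLoop ((rem.map (fun ch => (curr ++ ch, rem.filter (fun c => c != ch)))) ++ (fs ++ rest))
              (if curr != "" then res ++ [curr] else res) := by
            rw [List.cons_append]
            simp only [pvStackLoop]
        _ = pvStackLoop rest
              (((rem.map (fun ch => (curr ++ ch, rem.filter (fun c => c != ch)))) ++ fs).foldl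
                (fun a p => pvBacktrackA p.1 p.2 a)
                (if curr != "" then res ++ [curr] else res)) := by
            rw [← List.append_assoc]
            exact ih _ hle rest _
        _ = pvStackLoop rest (fs.foldl (fun a p => pvBacktrackA p.1 p.2 a) (pvBacktrackA curr rem res)) := by
            rw [List.foldl_append, List.foldl_map]
            congr 1
            rw [pvBacktrackA]
            rw [List.foldl_attach (l := rem)
              (f := fun a ch => pvBacktrackA (curr ++ ch) (rem.filter (fun c => c != ch)) a)]

theorem pvStackLoop_nil (res : List String) : pvStackLoop [] res = res := by
  simp [pvStackLoop]

-- ===== VERDICT (by name: the statement is the Claim_ definition above) =====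
theorem get_combination_words_spec : Claim_equal_get_combination_words := by
  intro characters _
  show get_combination_words characters = get_combination_words_alt characters
  have h := pvStackLoop_eq_foldl (pvStackMu [("", characters)]) [("", characters)]
    (le_refl _) [] []
  simp only [List.append_nil, List.foldl_cons, List.foldl_nil, pvStackLoop_nil] at h
  simp only [get_combination_words, get_combination_words_alt, h]
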